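-- pv_equiv track=rewrite | github.com/ProofFrog/ProofFrog | proof_frog/export/easycrypt/tactic_generator.py | _strip_matching
-- ===== SOURCE A (Python) =====
-- def _strip_matching(xs: list[str], ys: list[str]) -> list[str]:
--     """Return xs with one occurrence of each item in ys removed (if present)."""
--     remaining = list(ys)
--     out: list[str] = []
--     for x in xs:
--         if x in remaining:
--             remaining.remove(x)
--         else:
--             out.append(x)
--     return out
-- ===== SOURCE B (Python) =====
-- def _strip_matching(xs: list[str], ys: list[str]) -> list[str]:
--     """Return xs with one occurrence of each item in ys removed (if present)."""
--     out = list(xs)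
--     for y in ys:
--         try:
--             out.remove(y)
--         except ValueError:
--             pass
--     return out
-- ===== Notes on version B (the rewrite author's own statement) =====
-- stated objective: simpler
-- what changed: Inverts the traversal: instead of scanning xs and consuming a copy of ys while appending kept elements, B loops over ys and deletes the first matching occurrence from a copy of xs (list.remove with a try/except), returning what is left; the proof shows the two greedy orders commute.
import Mathlib
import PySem

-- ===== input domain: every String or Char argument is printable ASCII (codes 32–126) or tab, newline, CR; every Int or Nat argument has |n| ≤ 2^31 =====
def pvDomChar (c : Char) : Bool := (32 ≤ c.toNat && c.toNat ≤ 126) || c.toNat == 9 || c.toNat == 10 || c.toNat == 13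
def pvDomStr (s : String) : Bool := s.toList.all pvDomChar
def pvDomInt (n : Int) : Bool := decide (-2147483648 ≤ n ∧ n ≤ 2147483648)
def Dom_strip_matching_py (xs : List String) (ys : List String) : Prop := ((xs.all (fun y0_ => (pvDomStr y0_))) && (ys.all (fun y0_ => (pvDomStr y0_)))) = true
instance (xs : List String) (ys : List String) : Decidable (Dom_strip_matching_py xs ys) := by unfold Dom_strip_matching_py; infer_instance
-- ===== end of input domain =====

-- B inverts A's traversal: it loops over ys and deletes the first matching occurrence
-- from a copy of xs, instead of scanning xs while consuming a copy of ys (objective: simpler).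

-- ===== PORT A =====
-- 'remaining.remove(x)' is guarded by 'x in remaining', where PySem.List.remove? is
-- 'some (remaining.erase x)' (PySem.List.remove?_eq_some_erase), so '.erase x' is exact here.
def strip_matching_py (xs : List String) (ys : List String) : List String :=
  (xs.foldl
    (fun (s : List String × List String) x =>
      if x ∈ s.1 then (s.1.erase x, s.2)
      else (s.1, s.2 ++ [x]))
    (ys, [])).2

-- ===== PORT B =====
-- 'out.remove(y)' inside try/except ValueError: PySem.List.remove? returns none exactly
-- when Python raises ValueError, in which case the except branch keeps out unchanged.
def strip_matching_py_alt (xs : List String) (ys : List String) : List String :=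
  ys.foldl
    (fun out y =>
      match PySem.List.remove? out y with
      | some l => l
      | none => out)
    xs

-- ===== PRECONDITION & SPEC =====
def Spec_strip_matching_py (xs : List String) (ys : List String) (out : List String) : Prop := out = strip_matching_py_alt xs ys
instance (xs : List String) (ys : List String) (out : List String) : Decidable (Spec_strip_matching_py xs ys out) := by unfold Spec_strip_matching_py; infer_instance

-- ===== CLAIM (what is proved, stated in full; the proofs are below) =====
def Claim_equal_strip_matching_py : Prop := ∀ (xs : List String) (ys : List String), Dom_strip_matching_py xs ys → Spec_strip_matching_py xs ys (strip_matching_py xs ys)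

-- ===== LEMMAS AND PROOFS =====

-- B's loop body is List.erase: remove? gives the erase when the element is present,
-- and when absent the except branch keeps the list, which erase also does.
lemma bstep_eq_erase (out : List String) (y : String) :
    (match PySem.List.remove? out y with
     | some l => l
     | none => out) = out.erase y := by
  by_cases h : y ∈ out
  · rw [PySem.List.remove?_eq_some_erase out y h]
  · rw [(PySem.List.remove?_eq_none_iff out y).mpr h, List.erase_of_not_mem h]

-- A's loop without the output accumulator.
def stripGo (xs rem : List String) : List String :=
  match xs with
  | [] => []
  | x :: t => if x ∈ rem then stripGo t (rem.erase x) else x :: stripGo t rem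

lemma foldA_eq_stripGo (xs : List String) :
    ∀ (rem out : List String),
    (xs.foldl
      (fun (s : List String × List String) x =>
        if x ∈ s.1 then (s.1.erase x, s.2)
        else (s.1, s.2 ++ [x]))
      (rem, out)).2 = out ++ stripGo xs rem := by
  induction xs with
  | nil => intro rem out; simp [stripGo]
  | cons x t ih =>
    intro rem out
    simp only [List.foldl_cons, stripGo]
    by_cases h : x ∈ rem
    · simp only [h, if_pos]
      exact ih (rem.erase x) out
    · simp only [h, if_neg, not_false_eq_true, ih rem (out ++ [x])]
      simp

lemma erase_foldl_mem (ys : List String) :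
    ∀ (t : List String) (x : String), x ∈ ys →
    ys.foldl (fun l y => l.erase y) (x :: t)
      = (ys.erase x).foldl (fun l y => l.erase y) t := by
  induction ys with
  | nil => intro t x h; cases h
  | cons y q ih =>
    intro t x hx
    by_cases hyx : y = x
    · subst hyx
      simp [List.erase_cons_head]
    · have hx' : x ∈ q := by
        cases hx with
        | head => exact absurd rfl hyx
        | tail _ h => exact h
      have h1 : (x == y) = false := beq_eq_false_iff_ne.mpr (Ne.symm hyx)
      have h2 : (y == x) = false := beq_eq_false_iff_ne.mpr hyx
      simp only [List.foldl_cons, List.erase_cons, h1, h2, Bool.false_eq_true,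
        if_false]
      exact ih (t.erase y) x hx'

lemma erase_foldl_not_mem (ys : List String) :
    ∀ (t : List String) (x : String), x ∉ ys →
    ys.foldl (fun l y => l.erase y) (x :: t)
      = x :: ys.foldl (fun l y => l.erase y) t := by
  induction ys with
  | nil => intro t x _; rfl
  | cons y q ih =>
    intro t x hx
    have hyx : y ≠ x := fun h => hx (h ▸ List.mem_cons_self ..)
    have hx' : x ∉ q := fun h => hx (List.mem_cons_of_mem _ h)
    have h1 : (x == y) = false := beq_eq_false_iff_ne.mpr (Ne.symm hyx)
    simp only [List.foldl_cons, List.erase_cons, h1, Bool.false_eq_true, if_false]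
    exact ih (t.erase y) x hx'

-- The two greedy orders commute: consuming ys along xs equals deleting along ys.
lemma stripGo_eq_foldl_erase (xs : List String) :
    ∀ ys : List String, stripGo xs ys = ys.foldl (fun l y => l.erase y) xs := by
  induction xs with
  | nil =>
    intro ys
    have : ∀ ys : List String, ys.foldl (fun l y => l.erase y) ([] : List String) = [] := by
      intro ys; induction ys with
      | nil => rfl
      | cons y q ih => simpa using ih
    simp [stripGo, this ys]
  | cons x t ih =>
    intro ys
    simp only [stripGo]
    by_cases h : x ∈ ys
    · rw [if_pos h, ih (ys.erase x), erase_foldl_mem ys t x h]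
    · rw [if_neg h, ih ys, erase_foldl_not_mem ys t x h]

-- ===== VERDICT (by name: the statement is the Claim_ definition above) =====
theorem strip_matching_py_spec : Claim_equal_strip_matching_py := by
  intro xs ys _
  unfold Spec_strip_matching_py strip_matching_py strip_matching_py_alt
  have hb : (fun (out : List String) (y : String) =>
      match PySem.List.remove? out y with
      | some l => l
      | none => out) = fun l y => l.erase y := by
    funext out y; exact bstep_eq_erase out y
  rw [hb, foldA_eq_stripGo, List.nil_append, stripGo_eq_foldl_erase]
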